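-- pv_equiv track=rewrite | github.com/Bubupi27/BB-8 | Raspberry/Codi.py | generate_dic
-- ===== SOURCE A (Python) =====
-- def generate_dic(groud, llista):
--     dic = {}
--     l_original = llista
--     llista_interna = []
--
--     for i in llista:  # s'ha de fer aixo i no "l = llista" perque sino
--         llista_interna.append(i)  # "l" s'assigna en el mateix espai que "llista"
--     longitud_inicial_l = len(llista_interna)
--
--     clau = groud
--
--     aleatoritzador = groud
--
--     i = 0
--
--     while i != longitud_inicial_l:
--         rand = ((((clau % 1000000000000) + aleatoritzador % 1000000000) + 96739) % len(llista_interna))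
--         clau = ((clau % 1000000000003) + (aleatoritzador % 1000000000) + 104729)
--         dic[l_original[i]] = llista_interna[rand]
--
--         del llista_interna[rand]
--         aleatoritzador += 3
--         i = i + 1
--
--     return dic
-- ===== SOURCE B (Python) =====
-- def generate_dic(groud, llista):
--     # Order-statistics segment tree: select & logically delete the rank-th
--     # remaining element by descending the tree instead of A's list deletion.
--     # leaf = (count, value) ; node = (count, left, right)
--     n = len(llista)
--
--     def build(lo, hi):
--         if hi - lo == 1:
--             return (1, llista[lo])
--         mid = (lo + hi) // 2
--         return (hi - lo, build(lo, mid), build(mid, hi))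
--
--     def pick(t, k):
--         # return (k-th alive value, tree with it removed)
--         if len(t) == 2:
--             return t[1], (0, t[1])
--         lc = t[1][0]
--         if k < lc:
--             v, nl = pick(t[1], k)
--             return v, (t[0] - 1, nl, t[2])
--         v, nr = pick(t[2], k - lc)
--         return v, (t[0] - 1, t[1], nr)
--
--     dic = {}
--     clau = groud
--     aleat = groud
--     tree = build(0, n) if n > 0 else None
--     for i in range(n):
--         rand = (((clau % 1000000000000) + aleat % 1000000000) + 96739) % (n - i)
--         clau = ((clau % 1000000000003) + (aleat % 1000000000) + 104729)
--         v, tree = pick(tree, rand)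
--         dic[llista[i]] = v
--         aleat += 3
--     return dic
-- ===== Notes on version B (the rewrite author's own statement) =====
-- stated objective: alternative
-- what changed: B replaces A's del-from-list selection of the rank-th remaining element by an order-statistics segment tree (select and logically delete by descending counts); the PRNG stream and dict construction are unchanged.
import Mathlib
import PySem

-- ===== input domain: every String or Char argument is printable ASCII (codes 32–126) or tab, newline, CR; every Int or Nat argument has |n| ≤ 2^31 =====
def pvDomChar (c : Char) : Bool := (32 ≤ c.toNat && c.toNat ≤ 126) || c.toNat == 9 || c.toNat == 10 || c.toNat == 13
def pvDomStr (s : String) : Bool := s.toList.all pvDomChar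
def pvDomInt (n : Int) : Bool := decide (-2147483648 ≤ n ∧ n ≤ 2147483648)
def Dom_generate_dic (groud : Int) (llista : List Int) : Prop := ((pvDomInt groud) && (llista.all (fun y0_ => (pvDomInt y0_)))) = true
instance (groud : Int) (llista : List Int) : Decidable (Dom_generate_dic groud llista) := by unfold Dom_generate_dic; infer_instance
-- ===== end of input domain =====

-- B selects & deletes the rank-th remaining element with an order-statistics
-- segment tree instead of A's list indexing + del (alternative algorithm;
-- same PRNG stream and dict construction).

-- ===== PORT A =====
-- A's while loop: fuel = longitud_inicial_l - i; state (i, clau, aleatoritzador,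
-- llista_interna, dic).  rand is always in range (Python '%' of a positive
-- length), so pyGetD / eraseIdx are exact for llista_interna[rand] / del.
def generateDicLoopA (lorig : List Int) :
    Nat → Nat → Int → Int → List Int → PySem.Dict Int Int → PySem.Dict Int Int
  | 0, _, _, _, _, dic => dic
  | fuel + 1, i, clau, aleat, l, dic =>
      let rand := PySem.Int.mod ((PySem.Int.mod clau 1000000000000) +
                    PySem.Int.mod aleat 1000000000 + 96739) (l.length : Int)
      let clau' := (PySem.Int.mod clau 1000000000003) +
                    (PySem.Int.mod aleat 1000000000) + 104729
      let dic' := dic.insert (PySem.List.pyGetD lorig (i : Int) 0)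
                    (PySem.List.pyGetD l rand 0)
      generateDicLoopA lorig fuel (i + 1) clau' (aleat + 3)
        (l.eraseIdx rand.toNat) dic'

def generate_dic (groud : Int) (llista : List Int) : List (Int × Int) :=
  (generateDicLoopA llista llista.length 0 groud groud llista PySem.Dict.empty).items

-- ===== PORT B =====
-- leaf cnt v  /  node cnt left right  mirrors Source B's (count, value) / (count, l, r)
inductive PTree where
  | leaf : Nat → Int → PTree
  | node : Nat → PTree → PTree → PTree
deriving DecidableEq, Repr

def PTree.count : PTree → Nat
  | .leaf c _ => c
  | .node c _ _ => c

-- Source B's build(lo, hi); fuel (≥ hi - lo - 1 at every call) only makes the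
-- recursion structural.  Python only calls build with hi - lo ≥ 1, so the
-- `hi - lo ≤ 1` base case coincides with Python's `hi - lo == 1` there.
def buildT (xs : List Int) : Nat → Nat → Nat → PTree
  | 0, lo, _ => .leaf 1 (xs.getD lo 0)
  | fuel + 1, lo, hi =>
    if hi - lo ≤ 1 then .leaf 1 (xs.getD lo 0)
    else
      let mid := (lo + hi) / 2
      .node (hi - lo) (buildT xs fuel lo mid) (buildT xs fuel mid hi)

-- Source B's pick(t, k): k-th alive value and the tree with it removed
def pickT : PTree → Int → Int × PTree
  | .leaf _ v, _ => (v, .leaf 0 v)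
  | .node c l r, k =>
      let lc := l.count
      if k < (lc : Int) then
        let p := pickT l k
        (p.1, .node (c - 1) p.2 r)
      else
        let p := pickT r (k - (lc : Int))
        (p.1, .node (c - 1) l p.2)

-- Source B's for-loop over range(n); tree is Option PTree because Python holds
-- None when n = 0 (the `none` branch is unreachable, like Python's).
def generateDicLoopB (xs : List Int) (n : Nat) :
    Nat → Nat → Int → Int → Option PTree → PySem.Dict Int Int → PySem.Dict Int Int
  | 0, _, _, _, _, dic => dic
  | fuel + 1, i, clau, aleat, t?, dic =>
      match t? with
      | none => dic   -- unreachable: the loop body only runs when n > 0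
      | some t =>
        let rand := PySem.Int.mod ((PySem.Int.mod clau 1000000000000) +
                      PySem.Int.mod aleat 1000000000 + 96739) ((n : Int) - (i : Int))
        let clau' := (PySem.Int.mod clau 1000000000003) +
                      (PySem.Int.mod aleat 1000000000) + 104729
        let p := pickT t rand
        let dic' := dic.insert (xs.getD i 0) p.1
        generateDicLoopB xs n fuel (i + 1) clau' (aleat + 3) (some p.2) dic'

def generate_dic_alt (groud : Int) (llista : List Int) : List (Int × Int) :=
  let n := llista.length
  let tree : Option PTree := if 0 < n then some (buildT llista n 0 n) else none
  (generateDicLoopB llista n n 0 groud groud tree PySem.Dict.empty).items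

-- ===== PRECONDITION & SPEC =====
def Spec_generate_dic (groud : Int) (llista : List Int) (out : List (Int × Int)) : Prop := out = generate_dic_alt groud llista
instance (groud : Int) (llista : List Int) (out : List (Int × Int)) : Decidable (Spec_generate_dic groud llista out) := by unfold Spec_generate_dic; infer_instance

-- ===== CLAIM (what is proved, stated in full; the proofs are below) =====
def Claim_equal_generate_dic : Prop := ∀ (groud : Int) (llista : List Int), Dom_generate_dic groud llista → Spec_generate_dic groud llista (generate_dic groud llista)

-- ===== LEMMAS AND PROOFS =====

-- alive elements of a tree, in position order
def flattenT : PTree → List Int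
  | .leaf c v => if c = 1 then [v] else []
  | .node _ l r => flattenT l ++ flattenT r

-- well-formedness: counts are correct
def wfT : PTree → Prop
  | .leaf c _ => c ≤ 1
  | .node c l r => wfT l ∧ wfT r ∧ c = l.count + r.count ∧
      l.count = (flattenT l).length ∧ r.count = (flattenT r).length

theorem count_eq_len {t : PTree} (h : wfT t) : t.count = (flattenT t).length := by
  cases t with
  | leaf c v =>
      simp only [wfT] at h
      interval_cases c <;> simp [PTree.count, flattenT]
  | node c l r =>
      obtain ⟨_, _, hc, hl, hr⟩ := h
      simp only [PTree.count, flattenT, List.length_append]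
      omega

theorem pickT_spec {t : PTree} (k : Int) (hw : wfT t) (h0 : 0 ≤ k)
    (hk : k.toNat < (flattenT t).length) :
    (pickT t k).1 = (flattenT t).getD k.toNat 0 ∧
    flattenT (pickT t k).2 = (flattenT t).eraseIdx k.toNat ∧
    wfT (pickT t k).2 := by
  induction t generalizing k with
  | leaf c v =>
      simp only [wfT] at hw
      have hc : c = 1 := by
        by_contra hne
        interval_cases c <;> simp_all [flattenT]
      subst hc
      have : k.toNat = 0 := by simp [flattenT] at hk; omega
      simp [pickT, flattenT, this, wfT]
  | node c l r ihl ihr =>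
      obtain ⟨hwl, hwr, hc, hcl, hcr⟩ := hw
      simp only [flattenT, List.length_append] at hk
      by_cases hlt : k < (l.count : Int)
      · have hkl : k.toNat < (flattenT l).length := by omega
        obtain ⟨h1, h2, h3⟩ := ihl k hwl h0 hkl
        have hred : pickT (.node c l r) k = ((pickT l k).1, .node (c - 1) (pickT l k).2 r) := by
          simp [pickT, hlt]
        refine ⟨?_, ?_, ?_⟩
        · simp [hred, flattenT, h1, List.getD_eq_getElem?_getD,
            List.getElem?_append_left hkl]
        · simp [hred, flattenT, h2, List.eraseIdx_append_of_lt_length hkl]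
        · rw [hred]
          have hlen : (flattenT (pickT l k).2).length + 1 = (flattenT l).length := by
            rw [h2]; exact List.length_eraseIdx_add_one hkl
          have hcnt := count_eq_len h3
          exact ⟨h3, hwr, by omega, hcnt, hcr⟩
      · have hge : (l.count : Int) ≤ k := by omega
        have h0' : 0 ≤ k - (l.count : Int) := by omega
        have htn : (k - (l.count : Int)).toNat = k.toNat - (flattenT l).length := by
          omega
        have hkr : (k - (l.count : Int)).toNat < (flattenT r).length := by omega
        obtain ⟨h1, h2, h3⟩ := ihr (k - (l.count : Int)) hwr h0' hkr
        have hlen_le : (flattenT l).length ≤ k.toNat := by omega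
        have hred : pickT (.node c l r) k
            = ((pickT r (k - (l.count : Int))).1,
               .node (c - 1) l (pickT r (k - (l.count : Int))).2) := by
          simp [pickT, hlt]
        refine ⟨?_, ?_, ?_⟩
        · simp [hred, flattenT, h1, List.getD_eq_getElem?_getD,
            List.getElem?_append_right hlen_le, htn]
        · simp only [hred, flattenT, h2, htn]
          rw [List.eraseIdx_append_of_length_le hlen_le]
        · rw [hred]
          have hkr' : k.toNat - (flattenT l).length < (flattenT r).length := by omega
          have hlen : (flattenT (pickT r (k - (l.count : Int))).2).length + 1
              = (flattenT r).length := by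
            rw [h2, htn]; exact List.length_eraseIdx_add_one hkr'
          have hcnt := count_eq_len h3
          exact ⟨hwl, h3, by omega, hcl, hcnt⟩

theorem buildT_leaf_case (xs : List Int) (lo hi : Nat) (hlt : lo < hi)
    (hb : hi - lo ≤ 1) (hle : hi ≤ xs.length) :
    wfT (PTree.leaf 1 (xs.getD lo 0)) ∧
    flattenT (PTree.leaf 1 (xs.getD lo 0)) = (xs.drop lo).take (hi - lo) ∧
    (PTree.leaf 1 (xs.getD lo 0)).count = hi - lo := by
  have h1 : hi - lo = 1 := by omega
  have hlo : lo < xs.length := by omega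
  have htk : (xs.drop lo).take 1 = [xs[lo]] := by
    rw [List.drop_eq_getElem_cons hlo]; rfl
  refine ⟨by simp [wfT], ?_, by simp [PTree.count]; omega⟩
  rw [h1, htk]
  simp [flattenT, List.getD_eq_getElem?_getD, List.getElem?_eq_getElem hlo]

theorem buildT_spec_aux (xs : List Int) : ∀ (fuel lo hi : Nat), lo < hi →
    hi - lo ≤ fuel + 1 → hi ≤ xs.length →
    wfT (buildT xs fuel lo hi) ∧
    flattenT (buildT xs fuel lo hi) = (xs.drop lo).take (hi - lo) ∧
    (buildT xs fuel lo hi).count = hi - lo := by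
  intro fuel
  induction fuel with
  | zero =>
      intro lo hi hlt hd hle
      rw [buildT]
      exact buildT_leaf_case xs lo hi hlt (by omega) hle
  | succ fuel ih =>
      intro lo hi hlt hd hle
      rw [buildT]
      by_cases hbase : hi - lo ≤ 1
      · rw [if_pos hbase]
        exact buildT_leaf_case xs lo hi hlt hbase hle
      · rw [if_neg hbase]
        have hm1 : lo < (lo + hi) / 2 := by omega
        have hm2 : (lo + hi) / 2 < hi := by omega
        obtain ⟨w1, f1, c1⟩ := ih lo ((lo + hi) / 2) hm1 (by omega) (by omega)
        obtain ⟨w2, f2, c2⟩ := ih ((lo + hi) / 2) hi hm2 (by omega) hle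
        refine ⟨?_, ?_, by simp [PTree.count]⟩
        · refine ⟨w1, w2, ?_, (count_eq_len w1).symm ▸ rfl, (count_eq_len w2).symm ▸ rfl⟩
          rw [c1, c2]; omega
        · simp only [flattenT, f1, f2]
          have : xs.drop ((lo + hi) / 2) = (xs.drop lo).drop ((lo + hi) / 2 - lo) := by
            rw [List.drop_drop]; congr 1; omega
          rw [this, ← List.take_add]
          congr 1; omega

-- pyGetD with a nonnegative in-range Int index is getD at toNat
theorem pyGetD_toNat (l : List Int) (i : Int) (h0 : 0 ≤ i) (hl : i.toNat < l.length) :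
    PySem.List.pyGetD l i 0 = l.getD i.toNat 0 := by
  rw [PySem.List.pyGetD_eq_getElem l 0 h0 (by omega)]
  simp [List.getD_eq_getElem?_getD, List.getElem?_eq_getElem hl]

theorem loop_eq (xs : List Int) (n : Nat) :
    ∀ (fuel i : Nat) (clau aleat : Int) (l : List Int) (t : PTree)
      (dic : PySem.Dict Int Int),
      i + fuel = n → l.length = fuel → wfT t → flattenT t = l →
      generateDicLoopA xs fuel i clau aleat l dic
        = generateDicLoopB xs n fuel i clau aleat (some t) dic := by
  intro fuel
  induction fuel with
  | zero => intro _ _ _ _ _ _ _ _ _ _; rfl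
  | succ fuel ih =>
      intro i clau aleat l t dic hin hlen hw hf
      rw [generateDicLoopA, generateDicLoopB]
      have hmod : ((l.length : Nat) : Int) = (n : Int) - (i : Int) := by omega
      set rand := PySem.Int.mod ((PySem.Int.mod clau 1000000000000) +
        PySem.Int.mod aleat 1000000000 + 96739) (l.length : Int) with hrand
      have hpos : (0 : Int) < (l.length : Int) := by omega
      have hr0 : 0 ≤ rand := PySem.Int.mod_nonneg _ hpos
      have hrlt : rand < (l.length : Int) := PySem.Int.mod_lt _ hpos
      have hrlt' : rand.toNat < l.length := by omega
      have hkf : rand.toNat < (flattenT t).length := by rw [hf]; exact hrlt'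
      obtain ⟨p1, p2, p3⟩ := pickT_spec rand hw hr0 hkf
      rw [← hmod]
      have hval : PySem.List.pyGetD l rand 0 = (pickT t rand).1 := by
        rw [p1, hf, pyGetD_toNat l rand hr0 hrlt']
      have hkey : PySem.List.pyGetD xs (i : Int) 0 = xs.getD i 0 := by
        simp [PySem.List.pyGetD_natCast]
      rw [hval, hkey]
      exact ih (i + 1) _ _ (l.eraseIdx rand.toNat) (pickT t rand).2 _
        (by omega) (by rw [List.length_eraseIdx_of_lt hrlt']; omega) p3
        (by rw [p2, hf])

-- ===== VERDICT (by name: the statement is the Claim_ definition above) =====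
theorem generate_dic_spec : Claim_equal_generate_dic := by
  intro groud llista _
  unfold Spec_generate_dic generate_dic generate_dic_alt
  simp only
  cases hl : llista with
  | nil => rfl
  | cons x xs =>
      have hpos : 0 < llista.length := by rw [hl]; simp
      rw [← hl, if_pos hpos]
      obtain ⟨w, f, _⟩ := buildT_spec_aux llista llista.length 0 llista.length
        hpos (by omega) (le_refl _)
      rw [loop_eq llista llista.length llista.length 0 groud groud llista
        (buildT llista llista.length 0 llista.length) PySem.Dict.empty (by omega) rfl w
        (by rw [f]; simp)]
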